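-- pv_equiv track=rewrite | github.com/pypi-data/pypi-mirror-404 | packages/souleyez/souleyez-3.0.7.tar.gz/souleyez-3.0.7/souleyez/plugins/bloodhound.py | _parse_creds
-- ===== SOURCE A (Python) =====
-- def _parse_creds(args):
--     """Parse username, password, domain from args."""
--     username = password = domain = None
--
--     for i, arg in enumerate(args):
--         if arg == "-u" and i + 1 < len(args):
--             username = args[i + 1]
--         elif arg == "-p" and i + 1 < len(args):
--             password = args[i + 1]
--         elif arg == "-d" and i + 1 < len(args):
--             domain = args[i + 1]
--
--     return username, password, domain
-- ===== SOURCE B (Python) =====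
-- def _get_flag(args, flag):
--     """Last value following `flag`, or None; a trailing flag is ignored."""
--     result = None
--     for a, b in zip(args, args[1:]):
--         if a == flag:
--             result = b
--     return result
--
--
-- def _parse_creds(args):
--     """Parse username, password, domain from args."""
--     return _get_flag(args, "-u"), _get_flag(args, "-p"), _get_flag(args, "-d")
-- ===== Notes on version B (the rewrite author's own statement) =====
-- stated objective: simpler
-- what changed: Replaces A's single index-based pass with a shared state triple by a reusable flag-scanning helper applied independently per flag, dropping enumerate/index arithmetic in favour of head/tail scanning.
import Mathlib
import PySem

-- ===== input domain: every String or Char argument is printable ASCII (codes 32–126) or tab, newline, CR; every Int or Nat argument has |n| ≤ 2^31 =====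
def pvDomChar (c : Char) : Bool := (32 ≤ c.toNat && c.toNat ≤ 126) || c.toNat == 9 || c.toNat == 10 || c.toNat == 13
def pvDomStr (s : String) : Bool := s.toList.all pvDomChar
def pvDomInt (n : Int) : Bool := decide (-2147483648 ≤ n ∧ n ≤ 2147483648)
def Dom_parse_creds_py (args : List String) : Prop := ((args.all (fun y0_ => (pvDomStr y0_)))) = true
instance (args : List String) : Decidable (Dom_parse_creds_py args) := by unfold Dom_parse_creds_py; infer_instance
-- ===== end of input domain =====

-- B replaces A's single indexed pass with a reusable per-flag head/tail scan, applied once per flag (simpler decomposition, same O(n) cost).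


-- ===== PORT A =====
-- for i, arg in enumerate(args): carried as index i plus the remaining suffix; the if/elif chain is the loop body
def parseCredsStep (args : List String) (i : Nat) (arg : String)
    (s : Option String × Option String × Option String) :
    Option String × Option String × Option String :=
  if arg = "-u" ∧ i + 1 < args.length then
    match PySem.List.pyGet? args ((i : Int) + 1) with
    | some v => (some v, s.2.1, s.2.2)
    | none => s
  else if arg = "-p" ∧ i + 1 < args.length then
    match PySem.List.pyGet? args ((i : Int) + 1) with
    | some v => (s.1, some v, s.2.2)
    | none => s
  else if arg = "-d" ∧ i + 1 < args.length then
    match PySem.List.pyGet? args ((i : Int) + 1) with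
    | some v => (s.1, s.2.1, some v)
    | none => s
  else s

def parseCredsLoopA (args : List String) : Nat → List String →
    Option String × Option String × Option String →
    Option String × Option String × Option String
  | _, [], s => s
  | i, arg :: rest, s => parseCredsLoopA args (i + 1) rest (parseCredsStep args i arg s)

def parse_creds_py (args : List String) : Option String × Option String × Option String :=
  parseCredsLoopA args 0 args (none, none, none)

-- ===== PORT B =====
-- while len(args) >= 2: … ; args = args[1:]   (accumulator = result)
def getFlag (args : List String) (flag : String) : Option String :=
  -- for a, b in zip(args, args[1:]): …   (args[1:] = drop 1, exact for this nonnegative slice)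
  (args.zip (args.drop 1)).foldl
    (fun result p => if p.1 = flag then some p.2 else result) none

def parse_creds_py_alt (args : List String) : Option String × Option String × Option String :=
  (getFlag args "-u", getFlag args "-p", getFlag args "-d")

-- ===== PRECONDITION & SPEC =====
def Spec_parse_creds_py (args : List String) (out : Option String × Option String × Option String) : Prop := out = parse_creds_py_alt args
instance (args : List String) (out : Option String × Option String × Option String) : Decidable (Spec_parse_creds_py args out) := by unfold Spec_parse_creds_py; infer_instance

-- ===== CLAIM (what is proved, stated in full; the proofs are below) =====
def Claim_equal_parse_creds_py : Prop := ∀ (args : List String), Dom_parse_creds_py args → Spec_parse_creds_py args (parse_creds_py args)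

-- ===== LEMMAS AND PROOFS =====
-- generalized-accumulator form of getFlag's fold
def getFlagAux (flag : String) (l : List String) (acc : Option String) : Option String :=
  (l.zip (l.drop 1)).foldl (fun result p => if p.1 = flag then some p.2 else result) acc

theorem getFlag_eq_aux (args : List String) (flag : String) :
    getFlag args flag = getFlagAux flag args none := rfl

theorem parseCredsLoopA_eq (args : List String) :
    ∀ (rest : List String) (i : Nat) (s : Option String × Option String × Option String),
      args.drop i = rest →
      parseCredsLoopA args i rest s =
        (getFlagAux "-u" rest s.1, getFlagAux "-p" rest s.2.1, getFlagAux "-d" rest s.2.2) := by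
  intro rest
  induction rest with
  | nil => intro i s _; simp [parseCredsLoopA, getFlagAux]
  | cons x rest ih =>
    intro i s hdrop
    have htail : args.drop (i + 1) = rest := by
      rw [← List.tail_drop, hdrop]; rfl
    cases rest with
    | nil =>
      -- last element: the guard i+1 < len(args) fails
      have hlen : args.length ≤ i + 1 := by
        have := List.drop_eq_nil_iff.mp htail
        omega
      have hng : ¬ i + 1 < args.length := by omega
      simp [parseCredsLoopA, parseCredsStep, getFlagAux, hng]
    | cons y r =>
      have hget : args[i + 1]? = some y := by
        rw [← List.head?_drop, htail]; rfl
      obtain ⟨hlt, -⟩ := List.getElem?_eq_some_iff.mp hget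
      have hpy : PySem.List.pyGet? args ((i : Int) + 1) = some y := by
        have hc : ((i : Int) + 1) = ((i + 1 : Nat) : Int) := by push_cast; ring
        rw [hc, PySem.List.pyGet?_natCast, hget]
      have haux : ∀ (flag : String) (acc : Option String),
          getFlagAux flag (x :: y :: r) acc
            = getFlagAux flag (y :: r) (if x = flag then some y else acc) := by
        intro flag acc; rfl
      rw [parseCredsLoopA, ih (i + 1) _ htail, haux, haux, haux]
      by_cases hu : x = "-u"
      · simp [parseCredsStep, hu, hlt, hpy]
      · by_cases hp : x = "-p"
        · simp [parseCredsStep, hp, hlt, hpy]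
        · by_cases hd : x = "-d"
          · simp [parseCredsStep, hd, hlt, hpy]
          · simp [parseCredsStep, hu, hp, hd]

-- ===== VERDICT (by name: the statement is the Claim_ definition above) =====
theorem parse_creds_py_spec : Claim_equal_parse_creds_py := by
  intro args _
  unfold Spec_parse_creds_py parse_creds_py parse_creds_py_alt
  rw [getFlag_eq_aux, getFlag_eq_aux, getFlag_eq_aux]
  exact parseCredsLoopA_eq args args 0 (none, none, none) rfl
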